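-- pv_equiv track=rewrite | github.com/KatherLab/COBRA | cobra/inference/top_tiles.py | get_cache_dict
-- ===== SOURCE A (Python) =====
-- def get_cache_dict(file_dict, indices):
--     cache_dict = {}
--     for i, idx in enumerate(indices):
--         for key, value in file_dict.items():
--             if idx < value:
--                 cache_dict[i] = key
--                 break
--     return cache_dict
-- ===== SOURCE B (Python) =====
-- def get_cache_dict(file_dict, indices):
--     # One pass over the dict keeps only "record" entries (value strictly above every
--     # earlier value); their values are strictly increasing, so the first key whose
--     # value exceeds idx is found by binary search instead of a linear scan.
--     records = []
--     best = None
--     for key, value in file_dict.items():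
--         if best is None or value > best:
--             records.append((value, key))
--             best = value
--     n = len(records)
--     cache_dict = {}
--     for i, idx in enumerate(indices):
--         lo, hi = 0, n
--         while lo < hi:
--             mid = (lo + hi) // 2
--             if records[mid][0] <= idx:
--                 lo = mid + 1
--             else:
--                 hi = mid
--         if lo < n:
--             cache_dict[i] = records[lo][1]
--     return cache_dict
-- ===== Notes on version B (the rewrite author's own statement) =====
-- stated objective: faster
-- what changed: A scans the whole dict linearly for every index; B makes one pass over the dict keeping only the strictly increasing 'record' values (the only possible first matches) and answers each index with a binary search over them.
import Mathlib
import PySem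

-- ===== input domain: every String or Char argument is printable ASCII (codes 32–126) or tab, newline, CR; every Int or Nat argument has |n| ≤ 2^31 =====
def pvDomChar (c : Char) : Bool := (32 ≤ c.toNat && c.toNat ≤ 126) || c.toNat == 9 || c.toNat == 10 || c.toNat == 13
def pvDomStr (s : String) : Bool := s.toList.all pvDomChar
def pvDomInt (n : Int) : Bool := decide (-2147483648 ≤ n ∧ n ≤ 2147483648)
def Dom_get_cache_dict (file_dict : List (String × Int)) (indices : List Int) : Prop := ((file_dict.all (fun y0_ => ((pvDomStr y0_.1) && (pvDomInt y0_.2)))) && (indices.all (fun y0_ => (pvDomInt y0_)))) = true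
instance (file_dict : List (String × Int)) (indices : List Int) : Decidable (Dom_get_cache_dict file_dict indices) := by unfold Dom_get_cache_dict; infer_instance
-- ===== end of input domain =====

-- B replaces A's per-index linear scan of the dict by a single pass that keeps the
-- strictly increasing "record" values followed by a binary search per index (faster).

-- ===== PORT A =====
-- inner 'for key, value in file_dict.items(): if idx < value: … break' = first match
def pvFirstKey : List (String × Int) → Int → Option String
  | [], _ => none
  | (k, v) :: rest, idx => if idx < v then some k else pvFirstKey rest idx

def get_cache_dict (file_dict : List (String × Int)) (indices : List Int) : List (Int × String) :=
  ((PySem.List.enumerate indices 0).foldl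
    (fun (d : PySem.Dict Int String) p =>
      match pvFirstKey file_dict p.2 with
      | some k => d.insert p.1 k
      | none => d) PySem.Dict.empty).items

-- ===== PORT B =====
-- the 'records' building loop of Source B ('best is None or value > best')
def pvRecords : List (String × Int) → Option Int → List (Int × String)
  | [], _ => []
  | (k, v) :: rest, best =>
    if (match best with | none => true | some b => decide (b < v)) then
      (v, k) :: pvRecords rest (some v)
    else pvRecords rest best

-- Source B's hand-written 'while lo < hi' binary search; lo, hi stay in 0..n, so Nat with
-- Nat division is exact for Python's nonnegative ints and '//' here
def pvBsearch (records : List (Int × String)) (idx : Int) (lo hi : Nat) : Nat :=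
  if lo < hi then
    let mid := (lo + hi) / 2
    if (records.getD mid (0, "")).1 ≤ idx then pvBsearch records idx (mid + 1) hi
    else pvBsearch records idx lo mid
  else lo
termination_by hi - lo
decreasing_by all_goals omega

def get_cache_dict_alt (file_dict : List (String × Int)) (indices : List Int) : List (Int × String) :=
  let records := pvRecords file_dict none
  let n := records.length
  ((PySem.List.enumerate indices 0).foldl
    (fun (d : PySem.Dict Int String) p =>
      let lo := pvBsearch records p.2 0 n
      if lo < n then d.insert p.1 (records.getD lo (0, "")).2 else d)
    PySem.Dict.empty).items

-- ===== PRECONDITION & SPEC =====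
def Spec_get_cache_dict (file_dict : List (String × Int)) (indices : List Int) (out : List (Int × String)) : Prop := out = get_cache_dict_alt file_dict indices
instance (file_dict : List (String × Int)) (indices : List Int) (out : List (Int × String)) : Decidable (Spec_get_cache_dict file_dict indices out) := by unfold Spec_get_cache_dict; infer_instance

-- ===== CLAIM (what is proved, stated in full; the proofs are below) =====
def Claim_equal_get_cache_dict : Prop := ∀ (file_dict : List (String × Int)) (indices : List Int), Dom_get_cache_dict file_dict indices → Spec_get_cache_dict file_dict indices (get_cache_dict file_dict indices)

-- ===== LEMMAS AND PROOFS =====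

-- linear first-match over the record list (proof-only yardstick between the two ports)
def pvFirstGt : List (Int × String) → Int → Option String
  | [], _ => none
  | (v, k) :: rest, idx => if idx < v then some k else pvFirstGt rest idx

-- every record built above 'some b' has value > b
lemma pvRecords_gt (fd : List (String × Int)) (b : Int) :
    ∀ p ∈ pvRecords fd (some b), b < p.1 := by
  induction fd generalizing b with
  | nil => simp [pvRecords]
  | cons hd tl ih =>
    obtain ⟨k, v⟩ := hd
    intro p hp
    by_cases h : b < v
    · simp only [pvRecords, h, decide_true, if_pos] at hp
      rcases List.mem_cons.mp hp with h1 | h1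
      · subst h1; exact h
      · exact lt_trans h (ih v p h1)
    · simp only [pvRecords, h, decide_false, Bool.false_eq_true, if_neg,
        not_false_iff] at hp
      exact ih b p hp

-- record values are strictly increasing
lemma pvRecords_pairwise (fd : List (String × Int)) (best : Option Int) :
    (pvRecords fd best).Pairwise (fun p q => p.1 < q.1) := by
  induction fd generalizing best with
  | nil => simp [pvRecords]
  | cons hd tl ih =>
    obtain ⟨k, v⟩ := hd
    cases best with
    | none =>
      simp only [pvRecords, if_pos]
      exact List.Pairwise.cons (fun q hq => pvRecords_gt tl v q hq) (ih (some v))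
    | some b =>
      by_cases h : b < v
      · simp only [pvRecords, h, decide_true, if_pos]
        exact List.Pairwise.cons (fun q hq => pvRecords_gt tl v q hq) (ih (some v))
      · simp only [pvRecords, h, decide_false, Bool.false_eq_true, if_neg,
          not_false_iff]
        exact ih (some b)

-- first match over the records = first match over the whole dict
lemma pvFirstGt_records (fd : List (String × Int)) (best : Option Int) (idx : Int)
    (hb : ∀ b, best = some b → b ≤ idx) :
    pvFirstGt (pvRecords fd best) idx = pvFirstKey fd idx := by
  induction fd generalizing best with
  | nil => simp [pvRecords, pvFirstGt, pvFirstKey]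
  | cons hd tl ih =>
    obtain ⟨k, v⟩ := hd
    cases best with
    | none =>
      simp only [pvRecords, if_pos]
      by_cases hlt : idx < v
      · simp [pvFirstGt, pvFirstKey, hlt]
      · simp only [pvFirstGt, pvFirstKey, hlt, if_neg, not_false_iff]
        exact ih (some v) (fun b hb' => by cases hb'; omega)
    | some b =>
      have hbi : b ≤ idx := hb b rfl
      by_cases h : b < v
      · simp only [pvRecords, h, decide_true, if_pos]
        by_cases hlt : idx < v
        · simp [pvFirstGt, pvFirstKey, hlt]
        · simp only [pvFirstGt, pvFirstKey, hlt, if_neg, not_false_iff]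
          exact ih (some v) (fun b hb' => by cases hb'; omega)
      · have hlt : ¬ idx < v := by omega
        simp only [pvRecords, h, decide_false, Bool.false_eq_true, if_neg,
          not_false_iff, pvFirstKey, hlt]
        exact ih (some b) hb

-- binary-search invariant: everything left of the result is ≤ idx, the result (if in
-- range) is > idx
lemma pvBsearch_spec (recs : List (Int × String)) (idx : Int) :
    ∀ (lo hi : Nat), lo ≤ hi → hi ≤ recs.length →
    (∀ i j, i < j → j < recs.length → (recs.getD i (0, "")).1 < (recs.getD j (0, "")).1) →
    (∀ j, j < lo → (recs.getD j (0, "")).1 ≤ idx) →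
    (∀ j, hi ≤ j → j < recs.length → idx < (recs.getD j (0, "")).1) →
    (pvBsearch recs idx lo hi ≤ recs.length ∧
     (∀ j, j < pvBsearch recs idx lo hi → (recs.getD j (0, "")).1 ≤ idx) ∧
     (pvBsearch recs idx lo hi < recs.length → idx < (recs.getD (pvBsearch recs idx lo hi) (0, "")).1)) := by
  intro lo hi
  induction lo, hi using pvBsearch.induct recs idx with
  | case1 lo hi hlt mid hle ih =>
    intro _ hhi hsort hlow hhigh
    rw [pvBsearch, if_pos hlt]
    simp only [show mid = (lo + hi) / 2 from rfl] at *
    rw [if_pos hle]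
    refine ih (by omega) hhi hsort ?_ hhigh
    intro j hj
    by_cases hjm : j = (lo + hi) / 2
    · exact hjm ▸ hle
    · have hjlt : j < (lo + hi) / 2 := by omega
      exact le_trans (le_of_lt (hsort j ((lo + hi) / 2) hjlt (by omega))) hle
  | case2 lo hi hlt mid hgt ih =>
    intro _ hhi hsort hlow hhigh
    rw [pvBsearch, if_pos hlt]
    simp only [show mid = (lo + hi) / 2 from rfl] at *
    rw [if_neg hgt]
    refine ih (by omega) (by omega) hsort hlow ?_
    intro j hjm hjn
    by_cases hje : j = (lo + hi) / 2
    · subst hje; omega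
    · exact lt_trans (by omega : idx < (recs.getD ((lo + hi) / 2) (0, "")).1)
        (hsort ((lo + hi) / 2) j (by omega) hjn)
  | case3 lo hi hge =>
    intro hle hhi hsort hlow hhigh
    rw [pvBsearch, if_neg hge]
    exact ⟨by omega, hlow, fun h => hhigh lo (by omega) h⟩

-- the linear first-match at the position the invariants pin down
lemma pvFirstGt_eq_of (idx : Int) :
    ∀ (recs : List (Int × String)) (r : Nat), r ≤ recs.length →
    (∀ j, j < r → (recs.getD j (0, "")).1 ≤ idx) →
    (r < recs.length → idx < (recs.getD r (0, "")).1) →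
    pvFirstGt recs idx = (if r < recs.length then some (recs.getD r (0, "")).2 else none) := by
  intro recs
  induction recs with
  | nil =>
    intro r h1 _ _
    simp only [List.length_nil, Nat.le_zero] at h1
    subst h1
    simp [pvFirstGt]
  | cons hd tl ih =>
    obtain ⟨v, k⟩ := hd
    intro r h1 h2 h3
    by_cases hlt : idx < v
    · have hr : r = 0 := by
        by_contra hr
        have := h2 0 (by omega)
        simp at this
        omega
      subst hr
      simp [pvFirstGt, hlt]
    · have hr : r ≠ 0 := by
        intro hr
        subst hr
        have := h3 (by simp)
        simp at this
        omega
      obtain ⟨r', rfl⟩ : ∃ r', r = r' + 1 := ⟨r - 1, by omega⟩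
      have := ih r' (by simpa using h1)
        (fun j hj => by simpa using h2 (j + 1) (by omega))
        (fun h => by simpa using h3 (by simpa using h))
      simp only [pvFirstGt, hlt, if_neg, not_false_iff, this]
      simp

-- per-index agreement of the two lookups
lemma pvLookup_eq (fd : List (String × Int)) (idx : Int) :
    (if pvBsearch (pvRecords fd none) idx 0 (pvRecords fd none).length < (pvRecords fd none).length
     then some ((pvRecords fd none).getD
        (pvBsearch (pvRecords fd none) idx 0 (pvRecords fd none).length) (0, "")).2
     else none) = pvFirstKey fd idx := by
  have hpw := pvRecords_pairwise fd none
  set recs := pvRecords fd none with hrecs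
  have hsort : ∀ i j, i < j → j < recs.length →
      (recs.getD i (0, "")).1 < (recs.getD j (0, "")).1 := by
    intro i j hij hj
    have := (List.pairwise_iff_getElem (R := fun p q : Int × String => p.1 < q.1)
      (l := recs)).1 hpw i j (by omega) hj hij
    simpa [List.getD_eq_getElem?_getD, List.getElem?_eq_getElem,
      (by omega : i < recs.length), hj] using this
  have hspec := pvBsearch_spec recs idx 0 recs.length (by omega) (le_refl _) hsort
    (by omega) (by omega)
  rw [← pvFirstGt_records fd none idx (by simp)]
  exact (pvFirstGt_eq_of idx recs _ hspec.1 hspec.2.1 hspec.2.2).symm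

-- ===== VERDICT (by name: the statement is the Claim_ definition above) =====
theorem get_cache_dict_spec : Claim_equal_get_cache_dict := by
  intro fd indices _
  unfold Spec_get_cache_dict
  simp only [get_cache_dict, get_cache_dict_alt]
  congr 1
  apply List.foldl_ext
  intro d p _
  rw [← pvLookup_eq fd p.2]
  by_cases hlo : pvBsearch (pvRecords fd none) p.2 0 (pvRecords fd none).length <
      (pvRecords fd none).length
  · rw [if_pos hlo, if_pos hlo]
  · rw [if_neg hlo, if_neg hlo]
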